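-- pv_equiv track=rewrite | github.com/CodeCraftsmaniac/NSU-CSE226-VIBE-CODING | Project 1 (More Premium)/src/core.py | resolve_retakes
-- ===== SOURCE A (Python) =====
-- from collections import OrderedDict
--
-- GRADE_POINTS = {
--     "A": 4.00, "A-": 3.70,
--     "B+": 3.30, "B": 3.00, "B-": 2.70,
--     "C+": 2.30, "C": 2.00, "C-": 1.70,
--     "D+": 1.30, "D": 1.00,
--     "F": 0.00,
-- }
--
-- def _grade_rank(grade):
--     """Return a numeric rank for a grade (higher = better)."""
--     if grade in GRADE_POINTS:
--         return GRADE_POINTS[grade] + 10          # GPA grades rank 10–14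
--     if grade in ("P", "TR"):
--         return 10.5                               # Pass/Transfer: above F(10), below D(11)
--     if grade == "W":
--         return 1                                  # Withdrawal
--     if grade == "I":
--         return 0                                  # Incomplete
--     if grade == "":
--         return -2                                 # In-progress / empty
--     return -1                                     # Unknown
--
-- def resolve_retakes(rows):
--     """Keep only the BEST attempt per course → (resolved, retake_history).
--
--     Per NSU policy: 'Only the best grade will be used to calculate the CGPA.'
--     """
--     seen = OrderedDict()
--     history = {}
--     for r in rows:
--         code = r["course_code"]
--         if code in seen:
--             if code not in history:
--                 history[code] = [seen[code]["grade"]]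
--             history[code].append(r["grade"])
--             # Keep the attempt with the better grade
--             if _grade_rank(r["grade"]) > _grade_rank(seen[code]["grade"]):
--                 seen[code] = r
--         else:
--             seen[code] = r
--     return list(seen.values()), history
-- ===== SOURCE B (Python) =====
-- GRADE_POINTS = {
--     "A": 4.00, "A-": 3.70,
--     "B+": 3.30, "B": 3.00, "B-": 2.70,
--     "C+": 2.30, "C": 2.00, "C-": 1.70,
--     "D+": 1.30, "D": 1.00,
--     "F": 0.00,
-- }
--
-- def _grade_rank(grade):
--     """Return a numeric rank for a grade (higher = better)."""
--     if grade in GRADE_POINTS: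
--         return GRADE_POINTS[grade] + 10
--     if grade in ("P", "TR"):
--         return 10.5
--     if grade == "W":
--         return 1
--     if grade == "I":
--         return 0
--     if grade == "":
--         return -2
--     return -1
--
-- def resolve_retakes(rows):
--     """Keep only the BEST attempt per course -> (resolved, retake_history).
--
--     Group the rows by course code in one pass, then pick each group's best
--     attempt with max (which keeps the earliest of tied maxima, like the
--     original's strict '>'). History entries are created in the order a
--     course's SECOND attempt appears, matching the original's dict order.
--     """
--     groups = {}
--     retake_order = []
--     for r in rows:
--         code = r["course_code"]
--         g = groups.get(code)
--         if g is None: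
--             groups[code] = [r]
--         else:
--             if len(g) == 1:
--                 retake_order.append(code)
--             g.append(r)
--     resolved = [g[0] if len(g) == 1 else max(g, key=lambda r: _grade_rank(r["grade"]))
--                 for g in groups.values()]
--     history = {c: [r["grade"] for r in groups[c]] for c in retake_order}
--     return resolved, history
-- ===== Notes on version B (the rewrite author's own statement) =====
-- stated objective: alternative
-- what changed: Instead of A's single pass that incrementally maintains the current best row and grows history entries in place, B first groups rows by course code (recording the order in which a second attempt first appears), then takes a non-retake group's sole row as-is and picks each retake group's best row with max keyed by grade rank, building each history entry from the whole group at once.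
import Mathlib
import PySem

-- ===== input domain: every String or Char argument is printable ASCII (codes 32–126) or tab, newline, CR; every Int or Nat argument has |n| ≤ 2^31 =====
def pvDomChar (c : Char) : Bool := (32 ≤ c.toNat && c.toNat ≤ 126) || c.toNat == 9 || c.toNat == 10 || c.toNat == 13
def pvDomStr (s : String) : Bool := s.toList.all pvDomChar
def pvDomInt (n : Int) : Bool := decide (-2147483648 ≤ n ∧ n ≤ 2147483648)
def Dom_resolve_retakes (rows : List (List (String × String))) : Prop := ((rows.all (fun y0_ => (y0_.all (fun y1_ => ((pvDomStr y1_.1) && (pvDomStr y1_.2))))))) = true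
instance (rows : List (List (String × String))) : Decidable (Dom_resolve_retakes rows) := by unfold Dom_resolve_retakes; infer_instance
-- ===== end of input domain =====

-- B groups the rows by course code first, then picks each group's best attempt with max and
-- builds history entries from whole groups, instead of A's incremental best/history maintenance
-- (objective: alternative decomposition, same cost). A mutates its history lists in place but
-- never its argument; the equivalence is about the return value.


-- ===== PORT A =====
-- GRADE_POINTS with every float value scaled by 100 to Int (exact: these numbers only ever feed
-- _grade_rank, whose results are only COMPARED with <, and scaling by 100 preserves order and equality).
def gradePoints : PySem.Dict String Int := PySem.Dict.mk
  [("A", 400), ("A-", 370), ("B+", 330), ("B", 300), ("B-", 270),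
   ("C+", 230), ("C", 200), ("C-", 170), ("D+", 130), ("D", 100), ("F", 0)]

-- _grade_rank, with every float rank scaled by 100 (10 → 1000, 10.5 → 1050, 1 → 100, -2 → -200, -1 → -100)
def gradeRank (grade : String) : Int :=
  if gradePoints.contains grade then gradePoints.getD grade 0 + 1000
  else if grade = "P" ∨ grade = "TR" then 1050
  else if grade = "W" then 100
  else if grade = "I" then 0
  else if grade = "" then -200
  else -100

-- r["k"] on a row dict: first-match lookup, total via a default; exact under Pre_ (key present, keys unique)
def rowGet (r : List (String × String)) (k : String) : String :=
  ((PySem.Dict.mk r).get? k).getD ""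

-- the body of A's 'for r in rows' loop over the state (seen, history)
def stepA (st : PySem.Dict String (List (String × String)) × PySem.Dict String (List String))
    (r : List (String × String)) :
    PySem.Dict String (List (String × String)) × PySem.Dict String (List String) :=
  let seen := st.1
  let history := st.2
  let code := rowGet r "course_code"
  if seen.contains code then
    let history1 := if history.contains code then history
      else history.insert code [rowGet (seen.getD code []) "grade"]
    let history2 := history1.modify code [] (fun l => l ++ [rowGet r "grade"])
    let seen' := if gradeRank (rowGet r "grade") > gradeRank (rowGet (seen.getD code []) "grade")
      then seen.insert code r else seen
    (seen', history2)
  else (seen.insert code r, history)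

def resolve_retakes (rows : List (List (String × String))) :
    (List (List (String × String))) × (List (String × List String)) :=
  let st := rows.foldl stepA (PySem.Dict.mk [], PySem.Dict.mk [])
  (st.1.values, st.2.items)

-- ===== PORT B =====
-- max(g, key=lambda r: _grade_rank(r["grade"])): first row of maximal rank; total via a default
-- (only applied to groups with at least two rows)
def bestAttempt (g : List (List (String × String))) : List (String × String) :=
  (PySem.List.max? g (fun r => gradeRank (rowGet r "grade"))).getD []

-- the body of B's grouping loop over the state (groups, retake_order)
def stepB (st : PySem.Dict String (List (List (String × String))) × List String)
    (r : List (String × String)) :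
    PySem.Dict String (List (List (String × String))) × List String :=
  let groups := st.1
  let order := st.2
  let code := rowGet r "course_code"
  match groups.get? code with
  | none => (groups.insert code [r], order)
  | some g =>
      (groups.modify code [] (fun l => l ++ [r]),
       if g.length = 1 then order ++ [code] else order)

def resolve_retakes_alt (rows : List (List (String × String))) :
    (List (List (String × String))) × (List (String × List String)) :=
  let st := rows.foldl stepB (PySem.Dict.mk [], [])
  ((st.1.values).map (fun g => if g.length = 1 then PySem.List.pyGetD g 0 [] else bestAttempt g),
   st.2.map (fun c => (c, (st.1.getD c []).map (fun r => rowGet r "grade"))))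

-- ===== PRECONDITION & SPEC =====
-- the "course_code" value of a row, if any (statement-side helper; reaches no port)
def rowCode (r : List (String × String)) : Option String :=
  (r.find? (fun p => p.1 == "course_code")).map Prod.snd

-- Pre_ excludes (a) rows missing the "course_code" key, where both Pythons raise KeyError, (b) rows of
-- a course attempted more than once that miss the "grade" key, where both Pythons raise KeyError, and
-- (c) rows whose association list carries a duplicate key, which does not faithfully represent a
-- Python dict (Python keeps the last value, first-match lookup the first).
def Pre_resolve_retakes (rows : List (List (String × String))) : Prop :=
  ∀ r ∈ rows, (r.map Prod.fst).Nodup ∧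
    "course_code" ∈ r.map Prod.fst ∧
    (2 ≤ rows.countP (fun r' => rowCode r' == rowCode r) → "grade" ∈ r.map Prod.fst)
instance (rows : List (List (String × String))) : Decidable (Pre_resolve_retakes rows) := by
  unfold Pre_resolve_retakes; infer_instance

def pvWitness_resolve_retakes : List (List (String × String)) :=
  [[("course_code", "CSE115"), ("grade", "F")],
   [("course_code", "MAT120"), ("grade", "B+")],
   [("course_code", "CSE115"), ("grade", "A-")]]

def Spec_resolve_retakes (rows : List (List (String × String))) (out : (List (List (String × String))) × (List (String × List String))) : Prop := out = resolve_retakes_alt rows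
instance (rows : List (List (String × String))) (out : (List (List (String × String))) × (List (String × List String))) : Decidable (Spec_resolve_retakes rows out) := by unfold Spec_resolve_retakes; infer_instance

-- ===== CLAIM (what is proved, stated in full; the proofs are below) =====
def Claim_equal_resolve_retakes : Prop := ∀ (rows : List (List (String × String))), Dom_resolve_retakes rows → Pre_resolve_retakes rows → Spec_resolve_retakes rows (resolve_retakes rows)

-- ===== LEMMAS AND PROOFS =====

def gradeOf (r : List (String × String)) : String := rowGet r "grade"

-- the loop invariant tying A's state (seen, hist) to B's state (groups, order)
structure PVInv (seen : PySem.Dict String (List (String × String)))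
    (hist : PySem.Dict String (List String))
    (groups : PySem.Dict String (List (List (String × String))))
    (order : List String) : Prop where
  i1 : seen.items = groups.items.map (fun p => (p.1, bestAttempt p.2))
  i2 : hist.items = order.map (fun c => (c, (groups.getD c []).map gradeOf))
  i3 : groups.keys.Nodup
  i4 : ∀ p ∈ groups.items, p.2 ≠ []
  i5 : ∀ p ∈ groups.items, (p.1 ∈ order ↔ 2 ≤ p.2.length)
  i6 : ∀ c ∈ order, c ∈ groups.keys
  i7 : order.Nodup

lemma max?_append_singleton {α : Type} (g : List α) (r : α) (k : α → Int) :
    PySem.List.max? (g ++ [r]) k =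
      some ((PySem.List.max? g k).elim r (fun m => if k m < k r then r else m)) := by
  have h : PySem.List.max? (g ++ [r]) k =
      (match PySem.List.max? g k with
       | none => some r
       | some m => if k m < k r then some r else some m) := by
    unfold PySem.List.max?
    rw [List.foldl_append]
    rfl
  rw [h]
  cases PySem.List.max? g k with
  | none => rfl
  | some m => by_cases hc : k m < k r <;> simp [hc]

-- a dict whose items are a value-mapped copy of another's looks up the mapped value
lemma get?_map_val {α β : Type} (d : PySem.Dict String α) (e : PySem.Dict String β)
    (F : β → α) (h : d.items = e.items.map (fun p => (p.1, F p.2))) (k : String) :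
    d.get? k = (e.get? k).map F := by
  simp only [PySem.Dict.get?, h, List.find?_map]
  have hp : ((fun p => p.1 == k) ∘ fun (p : String × β) => (p.1, F p.2)) =
      (fun p => p.1 == k) := rfl
  rw [hp]
  cases List.find? (fun p => p.1 == k) e.items <;> rfl

lemma inv_step (seen : PySem.Dict String (List (String × String)))
    (hist : PySem.Dict String (List String))
    (groups : PySem.Dict String (List (List (String × String))))
    (order : List String) (r : List (String × String))
    (h : PVInv seen hist groups order) :
    PVInv (stepA (seen, hist) r).1 (stepA (seen, hist) r).2
        (stepB (groups, order) r).1 (stepB (groups, order) r).2 := by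
  obtain ⟨i1, i2, i3, i4, i5, i6, i7⟩ := h
  have hget : ∀ k, seen.get? k = (groups.get? k).map bestAttempt :=
    get?_map_val seen groups bestAttempt i1
  have hkeysH : hist.keys = order := by
    simp [PySem.Dict.keys, i2, List.map_map, Function.comp_def]
  simp only [stepA, stepB]
  generalize hcode : rowGet r "course_code" = code
  cases hg : groups.get? code with
  | none =>
    have hsg : seen.get? code = none := by rw [hget, hg]; rfl
    have hcs : seen.contains code = false := by
      rw [PySem.Dict.contains_eq_isSome_get?, hsg]; rfl
    have hcg : groups.contains code = false := by
      rw [PySem.Dict.contains_eq_isSome_get?, hg]; rfl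
    have hnk : code ∉ groups.keys := (PySem.Dict.get?_eq_none_iff_not_mem_keys _ _).mp hg
    have hno : code ∉ order := fun hc => hnk (i6 _ hc)
    simp only [hcs, Bool.false_eq_true, if_false]
    refine ⟨?_, ?_, ?_, ?_, ?_, ?_, i7⟩
    · rw [PySem.Dict.items_insert_of_not_contains _ _ hcs,
        PySem.Dict.items_insert_of_not_contains _ _ hcg, List.map_append, i1]
      rfl
    · rw [i2]
      refine List.map_congr_left (fun c hc => ?_)
      rw [PySem.Dict.getD_insert_of_ne _ _ _ (fun he => hno (by rwa [he] at hc))]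
    · exact PySem.Dict.nodup_keys_insert _ _ _ i3
    · intro p hp
      rcases (PySem.Dict.mem_items_insert _ _ _ _).mp hp with h' | ⟨h', _⟩
      · subst h'; simp
      · exact i4 p h'
    · intro p hp
      rcases (PySem.Dict.mem_items_insert _ _ _ _).mp hp with h' | ⟨h', _⟩
      · subst h'
        simpa using fun hc => absurd hc hno
      · exact i5 p h'
    · intro c hc
      exact (PySem.Dict.mem_keys_insert _ _ _ _).mpr (Or.inr (i6 c hc))
  | some g =>
    have hsg : seen.get? code = some (bestAttempt g) := by rw [hget, hg]; rfl
    have hcs : seen.contains code = true := by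
      rw [PySem.Dict.contains_eq_isSome_get?, hsg]; rfl
    have hcg : groups.contains code = true := by
      rw [PySem.Dict.contains_eq_isSome_get?, hg]; rfl
    have hgd : groups.getD code [] = g := PySem.Dict.getD_of_get?_eq_some _ _ hg
    have hsd : seen.getD code [] = bestAttempt g := PySem.Dict.getD_of_get?_eq_some _ _ hsg
    have hmem : (code, g) ∈ groups.items := PySem.Dict.mem_items_of_get?_eq_some _ hg
    have hgne : g ≠ [] := i4 _ hmem
    have hio : code ∈ order ↔ 2 ≤ g.length := i5 _ hmem
    have hch : hist.contains code = decide (code ∈ order) := by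
      rw [PySem.Dict.contains_eq_decide_mem_keys, hkeysH]
    obtain ⟨m, hm⟩ : ∃ m, PySem.List.max? g (fun r => gradeRank (rowGet r "grade")) = some m := by
      cases hmx : PySem.List.max? g (fun r => gradeRank (rowGet r "grade")) with
      | none => exact absurd ((PySem.List.max?_eq_none_iff _ _).mp hmx) hgne
      | some m => exact ⟨m, rfl⟩
    have hbg : bestAttempt g = m := by rw [bestAttempt, hm]; rfl
    have hbapp : bestAttempt (g ++ [r]) =
        (if gradeRank (rowGet m "grade") < gradeRank (rowGet r "grade") then r else m) := by
      rw [bestAttempt, max?_append_singleton, hm]; rfl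
    have huniq : ∀ p ∈ groups.items, p.1 = code → p = (code, g) := by
      intro p hp he
      obtain ⟨k, v⟩ := p
      simp only at he
      subst he
      have := PySem.Dict.get?_of_mem_items groups hp i3
      rw [hg] at this
      simp only [Option.some.injEq] at this
      rw [this]
    have hreplG : (groups.insert code (g ++ [r])).items =
        groups.items.map (fun p => if p.1 == code then (code, g ++ [r]) else p) :=
      PySem.Dict.items_insert_of_contains _ _ hcg
    have hkeyG : (groups.insert code (g ++ [r])).keys = groups.keys :=
      PySem.Dict.keys_insert_of_contains _ _ hcg
    simp only [hcs, if_true, hsd, hgd, hbg, PySem.Dict.modify]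
    refine ⟨?_, ?_, ?_, ?_, ?_, ?_, ?_⟩
    · -- i1
      by_cases hcmp : gradeRank (rowGet r "grade") > gradeRank (rowGet m "grade")
      · rw [if_pos hcmp, PySem.Dict.items_insert_of_contains _ _ hcs, hreplG, i1,
          List.map_map, List.map_map]
        refine List.map_congr_left (fun p hp => ?_)
        by_cases hpc : p.1 = code
        · obtain rfl := huniq p hp hpc
          simp [hbapp, gt_iff_lt.mp hcmp]
        · simp [hpc]
      · rw [if_neg hcmp, hreplG, i1, List.map_map]
        refine List.map_congr_left (fun p hp => ?_)
        by_cases hpc : p.1 = code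
        · obtain rfl := huniq p hp hpc
          have : ¬ gradeRank (rowGet m "grade") < gradeRank (rowGet r "grade") := hcmp
          simp [hbapp, this, hbg]
        · simp [hpc]
    · -- i2
      by_cases hlen : g.length = 1
      · obtain ⟨x, rfl⟩ := List.length_eq_one_iff.mp hlen
        have hmx : m = x := by
          have := hm
          simp only [PySem.List.max?, List.foldl] at this
          exact (Option.some.injEq _ _).mp this.symm
        subst hmx
        have hno2 : code ∉ order := fun hc => by have := hio.mp hc; simp at this
        have hchf : hist.contains code = false := by rw [hch]; simp [hno2]
        have hkne : ∀ p ∈ hist.items, p.1 ≠ code := by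
          intro p hp he
          apply hno2
          rw [← he, ← hkeysH]
          exact List.mem_map_of_mem hp
        rw [if_neg (by simp [hchf]), if_pos (by simp [hlen])]
        rw [PySem.Dict.items_insert_of_contains _ _
            (PySem.Dict.contains_insert_self _ _ _),
          PySem.Dict.items_insert_of_not_contains _ _ hchf,
          PySem.Dict.getD_insert_self, List.map_append, List.map_append]
        refine congrArg₂ _ ?_ ?_
        · rw [i2, List.map_map]
          refine List.map_congr_left (fun c hc => ?_)
          have hcne : c ≠ code := fun he => hno2 (he ▸ hc)
          simp [hcne, PySem.Dict.getD_insert_of_ne _ _ _ hcne]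
        · simp [PySem.Dict.getD_insert_self, gradeOf]
      · have h2 : 2 ≤ g.length := by
          have h0 : g.length ≠ 0 := fun h0 => hgne (List.length_eq_zero_iff.mp h0)
          omega
        have hin : code ∈ order := hio.mpr h2
        have hcht : hist.contains code = true := by rw [hch]; simp [hin]
        have hhd : hist.getD code [] = g.map gradeOf := by
          have hmem2 : (code, g.map gradeOf) ∈ hist.items := by
            rw [i2]
            have := List.mem_map_of_mem (f := fun c => (c, (groups.getD c []).map gradeOf)) hin
            simpa [hgd] using this
          exact PySem.Dict.getD_of_mem_items _ hmem2 (hkeysH ▸ i7) []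
        rw [if_pos (by simp [hcht]), if_neg (by simp [hlen]), hhd,
          PySem.Dict.items_insert_of_contains _ _ hcht, i2, List.map_map]
        refine List.map_congr_left (fun c hc => ?_)
        by_cases hcc : c = code
        · subst hcc
          simp [PySem.Dict.getD_insert_self, gradeOf]
        · simp [hcc, PySem.Dict.getD_insert_of_ne _ _ _ hcc]
    · -- i3
      exact PySem.Dict.nodup_keys_insert _ _ _ i3
    · -- i4
      intro p hp
      rcases (PySem.Dict.mem_items_insert _ _ _ _).mp hp with h' | ⟨h', _⟩
      · subst h'; simp
      · exact i4 p h'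
    · -- i5
      intro p hp
      rcases (PySem.Dict.mem_items_insert _ _ _ _).mp hp with h' | ⟨h', hpne⟩
      · subst h'
        by_cases hlen : g.length = 1
        · rw [if_pos (by simp [hlen])]
          simp [hlen]
        · have h2 : 2 ≤ g.length := by
            have h0 : g.length ≠ 0 := fun h0 => hgne (List.length_eq_zero_iff.mp h0)
            omega
          rw [if_neg (by simp [hlen])]
          simp only [List.length_append, List.length_cons, List.length_nil]
          constructor
          · intro _; omega
          · intro _; exact hio.mpr h2
      · have hold := i5 p h'
        by_cases hlen : g.length = 1
        · rw [if_pos (by simp [hlen])]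
          simp only [List.mem_append, List.mem_singleton]
          constructor
          · rintro (hc | hc)
            · exact hold.mp hc
            · exact absurd hc hpne
          · intro hc; exact Or.inl (hold.mpr hc)
        · rw [if_neg (by simp [hlen])]
          exact hold
    · -- i6
      intro c hc
      rw [hkeyG]
      by_cases hlen : g.length = 1
      · rw [if_pos (by simp [hlen])] at hc
        rcases List.mem_append.mp hc with hc | hc
        · exact i6 c hc
        · rw [List.mem_singleton.mp hc]
          exact PySem.Dict.mem_keys_of_mem_items groups hmem
      · rw [if_neg (by simp [hlen])] at hc
        exact i6 c hc
    · -- i7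
      by_cases hlen : g.length = 1
      · rw [if_pos (by simp [hlen])]
        have hno2 : code ∉ order := fun hc => by
          have := hio.mp hc; rw [hlen] at this; omega
        simp [List.nodup_append, i7]
        exact fun a ha he => hno2 (he ▸ ha)
      · rw [if_neg (by simp [hlen])]
        exact i7


lemma inv_fold (rows : List (List (String × String)))
    (seen : PySem.Dict String (List (String × String)))
    (hist : PySem.Dict String (List String))
    (groups : PySem.Dict String (List (List (String × String))))
    (order : List String)
    (h : PVInv seen hist groups order) :
    PVInv (rows.foldl stepA (seen, hist)).1 (rows.foldl stepA (seen, hist)).2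
        (rows.foldl stepB (groups, order)).1 (rows.foldl stepB (groups, order)).2 := by
  induction rows generalizing seen hist groups order with
  | nil => exact h
  | cons r rows ih =>
      have h' := inv_step seen hist groups order r h
      simpa using ih _ _ _ _ h'

-- ===== VERDICT (by name: the statement is the Claim_ definition above) =====
theorem resolve_retakes_spec : Claim_equal_resolve_retakes := by
  intro rows _ _
  have h := inv_fold rows (PySem.Dict.mk []) (PySem.Dict.mk []) (PySem.Dict.mk []) []
    ⟨rfl, rfl, List.nodup_nil, by simp, by simp, by simp, List.nodup_nil⟩
  show _ = _
  unfold resolve_retakes resolve_retakes_alt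
  refine Prod.ext ?_ ?_
  · simp only [PySem.Dict.values, h.i1, List.map_map]
    refine List.map_congr_left (fun p hp => ?_)
    have hne := h.i4 p hp
    by_cases hl : p.2.length = 1
    · obtain ⟨x, hx⟩ := List.length_eq_one_iff.mp hl
      simp [Function.comp_def, hl, hx, bestAttempt, PySem.List.max?]
    · simp [Function.comp_def, hl]
  · exact h.i2
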